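-- pv_equiv track=rewrite | github.com/foksiny/c5 | c5c/compiler.py | _namespace_type
-- ===== SOURCE A (Python) =====
-- def _namespace_type(ty, namespace):
--     """Recursively add namespace prefix to a type string."""
--     if not ty: return ty
--     # Built-in types
--     builtins = {'int', 'char', 'float', 'string', 'void', 'fnptr'}
--
--     # Handle pointers
--     if ty.endswith('*'):
--         return _namespace_type(ty[:-1], namespace) + '*'
--
--     # Handle template-like types: array<T>, float<32>
--     if '<' in ty:
--         base = ty.split('<')[0]
--         inner = ty[ty.find('<')+1 : ty.rfind('>')]
--         if base == 'array':
--             return f"array<{_namespace_type(inner, namespace)}>"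
--         return ty # e.g. float<32>
--
--     # Handle modifiers
--     for mod in ['const ', 'signed ', 'unsigned ']:
--         if ty.startswith(mod):
--             return mod + _namespace_type(ty[len(mod):], namespace)
--
--     # If already namespaced or a built-in, leave it
--     if '::' in ty or ty in builtins:
--         return ty
--
--     # Otherwise, it's a user-defined type name, namespace it
--     return f"{namespace}::{ty}"
-- ===== SOURCE B (Python) =====
-- def _namespace_type(ty, namespace):
--     """Strip all trailing '*'s up front, resolve template types once, then peel
--     leading modifiers with an iterative loop and assemble mods + core + stars."""
--     builtin_types = {'int', 'char', 'float', 'string', 'void', 'fnptr'}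
--     body = ty.rstrip('*')
--     stars = '*' * (len(ty) - len(body))
--     if '<' in body:
--         if body.split('<')[0] == 'array':
--             inner = body[body.find('<') + 1: body.rfind('>')]
--             return 'array<' + _namespace_type(inner, namespace) + '>' + stars
--         return body + stars
--     mods = ''
--     while True:
--         for mod in ('const ', 'signed ', 'unsigned '):
--             if body.startswith(mod):
--                 mods += mod
--                 body = body[len(mod):]
--                 break
--         else:
--             break
--     if not body or '::' in body or body in builtin_types:
--         return mods + body + stars
--     return mods + namespace + '::' + body + stars
-- ===== Notes on version B (the rewrite author's own statement) =====
-- stated objective: alternative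
-- what changed: B strips the whole run of trailing '*'s in one pass and rebuilds it by length, resolves the template case once on the star-free body, and replaces A's recursion over leading modifiers by an iterative peel loop with an accumulator; only the array<...> inner keeps a recursive call.
import Mathlib
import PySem

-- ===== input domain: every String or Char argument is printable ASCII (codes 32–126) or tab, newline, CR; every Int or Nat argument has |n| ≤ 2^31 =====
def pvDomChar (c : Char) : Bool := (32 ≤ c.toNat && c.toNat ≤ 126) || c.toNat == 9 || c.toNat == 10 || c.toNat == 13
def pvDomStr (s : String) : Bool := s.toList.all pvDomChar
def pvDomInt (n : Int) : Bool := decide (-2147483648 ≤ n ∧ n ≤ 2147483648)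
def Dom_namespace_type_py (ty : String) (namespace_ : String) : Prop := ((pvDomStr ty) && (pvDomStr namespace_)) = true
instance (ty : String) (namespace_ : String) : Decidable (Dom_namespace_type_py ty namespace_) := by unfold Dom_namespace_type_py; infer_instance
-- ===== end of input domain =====

-- B strips all trailing '*'s up front, resolves the template case once, then peels
-- leading modifiers with an iterative accumulator loop; objective: alternative decomposition.

-- ===== PORT A =====
-- the Python set literal 'builtins' (shared by both ports)
def pvBuiltins : List (List Char) :=
  ["int".toList, "char".toList, "float".toList, "string".toList, "void".toList, "fnptr".toList]

-- termination facts for the recursive calls (cited by name in decreasing_by of both ports)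
theorem pvStarLt (ty : List Char) (h0 : ty ≠ []) :
    (PySem.List.slice ty none (some (-1))).length < ty.length := by
  rw [PySem.List.slice_to_neg_one, List.length_dropLast]
  have hpos : 0 < ty.length := List.length_pos_iff.mpr h0
  omega

theorem pvFromLt (ty : List Char) (a : Int) (h0 : ty ≠ []) (ha : 0 < a) :
    (PySem.List.slice ty (some a) none).length < ty.length := by
  rw [PySem.List.slice_from ty (le_of_lt ha), List.length_drop]
  have hpos : 0 < ty.length := List.length_pos_iff.mpr h0
  omega

theorem pvInnerLt (ty : List Char) (a b : Int) (h0 : ty ≠ []) (ha : 1 ≤ a) :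
    (PySem.List.slice ty (some a) (some b)).length < ty.length := by
  rw [PySem.List.length_slice]
  have hb := PySem.List.clampIdx_le ty.length b
  have hpos : 0 < ty.length := List.length_pos_iff.mpr h0
  have h1 : 1 ≤ PySem.List.clampIdx ty.length a := by
    unfold PySem.List.clampIdx
    split_ifs with h <;> omega
  omega

-- '<' in ty gives 0 ≤ ty.find('<') (used for termination of the array-inner call)
theorem pvFindLtNonneg (ty : List Char) (h : PySem.Chars.isIn "<".toList ty = true) :
    0 ≤ PySem.Chars.find ty "<".toList :=
  (PySem.Chars.find_nonneg_iff ty "<".toList).mpr ((PySem.Chars.isIn_iff_infix _ _).mp h)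

-- A, transliterated on List Char; ty.split('<')[0] is ported as the head of split?
-- (sep ≠ '' so split? is some, and Python's split never returns an empty list, so [0] is the head);
-- 6/7/9 are len('const ')/len('signed ')/len('unsigned ')
def nsA (ty ns : List Char) : List Char :=
  if h0 : ty = [] then ty
  else if PySem.Chars.endswith ty "*".toList then
    nsA (PySem.List.slice ty none (some (-1))) ns ++ "*".toList
  else if hlt : PySem.Chars.isIn "<".toList ty then
    if ((PySem.Chars.split? ty "<".toList).getD []).headD [] = "array".toList then
      "array<".toList ++
        nsA (PySem.List.slice ty (some (PySem.Chars.find ty "<".toList + 1))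
              (some (PySem.Chars.rfind ty ">".toList))) ns ++ ">".toList
    else ty
  else if PySem.Chars.startswith ty "const ".toList then
    "const ".toList ++ nsA (PySem.List.slice ty (some 6) none) ns
  else if PySem.Chars.startswith ty "signed ".toList then
    "signed ".toList ++ nsA (PySem.List.slice ty (some 7) none) ns
  else if PySem.Chars.startswith ty "unsigned ".toList then
    "unsigned ".toList ++ nsA (PySem.List.slice ty (some 9) none) ns
  else if PySem.Chars.isIn "::".toList ty || pvBuiltins.contains ty then ty
  else ns ++ "::".toList ++ ty
termination_by ty.length
decreasing_by
  · exact pvStarLt ty h0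
  · exact pvInnerLt ty _ _ h0 (by have := pvFindLtNonneg ty hlt; omega)
  · exact pvFromLt ty 6 h0 (by norm_num)
  · exact pvFromLt ty 7 h0 (by norm_num)
  · exact pvFromLt ty 9 h0 (by norm_num)

def namespace_type_py (ty : String) (namespace_ : String) : String :=
  String.ofList (nsA ty.toList namespace_.toList)

-- ===== PORT B =====
-- exact port of ty.rstrip('*'): remove the maximal run of trailing '*' characters
def pvStripStars (ty : List Char) : List Char :=
  (List.dropWhile (fun c => c == '*') ty.reverse).reverse

-- Source B's while/for modifier loop: accumulate peeled modifiers in mods, return (mods, rest)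
def pvPeelMods (mods body : List Char) : List Char × List Char :=
  if h1 : PySem.Chars.startswith body "const ".toList then
    pvPeelMods (mods ++ "const ".toList) (PySem.List.slice body (some 6) none)
  else if h2 : PySem.Chars.startswith body "signed ".toList then
    pvPeelMods (mods ++ "signed ".toList) (PySem.List.slice body (some 7) none)
  else if h3 : PySem.Chars.startswith body "unsigned ".toList then
    pvPeelMods (mods ++ "unsigned ".toList) (PySem.List.slice body (some 9) none)
  else (mods, body)
termination_by body.length
decreasing_by
  · exact pvFromLt body 6 (by rintro rfl; exact absurd ((PySem.Chars.startswith_iff _ _).mp h1) (by decide)) (by norm_num)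
  · exact pvFromLt body 7 (by rintro rfl; exact absurd ((PySem.Chars.startswith_iff _ _).mp h2) (by decide)) (by norm_num)
  · exact pvFromLt body 9 (by rintro rfl; exact absurd ((PySem.Chars.startswith_iff _ _).mp h3) (by decide)) (by norm_num)

-- body ≠ [] whenever '<' occurs in it (used for termination of B's single recursive call)
theorem pvIsInNe (body : List Char) (h : PySem.Chars.isIn "<".toList body = true) : body ≠ [] := by
  rintro rfl
  have := ((PySem.Chars.isIn_iff_infix _ _).mp h).length_le
  simp at this

theorem pvStripLe (ty : List Char) : (pvStripStars ty).length ≤ ty.length := by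
  have h := List.length_dropWhile_le (fun c => c == '*') ty.reverse
  simp only [List.length_reverse] at h
  simpa [pvStripStars] using h

-- B: stars stripped once, a single recursive call for array<...>, iterative modifier peel
def nsB (ty ns : List Char) : List Char :=
  if hlt : PySem.Chars.isIn "<".toList (pvStripStars ty) then
    (if ((PySem.Chars.split? (pvStripStars ty) "<".toList).getD []).headD [] = "array".toList then
      "array<".toList ++
        nsB (PySem.List.slice (pvStripStars ty)
              (some (PySem.Chars.find (pvStripStars ty) "<".toList + 1))
              (some (PySem.Chars.rfind (pvStripStars ty) ">".toList))) ns ++ ">".toList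
     else pvStripStars ty) ++ List.replicate (ty.length - (pvStripStars ty).length) '*'
  else
    (match pvPeelMods [] (pvStripStars ty) with
     | (mods, core) =>
        (if core = [] ∨ PySem.Chars.isIn "::".toList core || pvBuiltins.contains core then
          mods ++ core
         else mods ++ ns ++ "::".toList ++ core))
      ++ List.replicate (ty.length - (pvStripStars ty).length) '*'
termination_by ty.length
decreasing_by
  have h1 := pvInnerLt (pvStripStars ty) (PySem.Chars.find (pvStripStars ty) "<".toList + 1)
    (PySem.Chars.rfind (pvStripStars ty) ">".toList) (pvIsInNe _ hlt)
    (by have := pvFindLtNonneg _ hlt; omega)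
  have h2 := pvStripLe ty
  omega

def namespace_type_py_alt (ty : String) (namespace_ : String) : String :=
  String.ofList (nsB ty.toList namespace_.toList)

-- ===== PRECONDITION & SPEC =====
def Spec_namespace_type_py (ty : String) (namespace_ : String) (out : String) : Prop := out = namespace_type_py_alt ty namespace_
instance (ty : String) (namespace_ : String) (out : String) : Decidable (Spec_namespace_type_py ty namespace_ out) := by unfold Spec_namespace_type_py; infer_instance

-- ===== CLAIM (what is proved, stated in full; the proofs are below) =====
def Claim_equal_namespace_type_py : Prop := ∀ (ty : String) (namespace_ : String), Dom_namespace_type_py ty namespace_ → Spec_namespace_type_py ty namespace_ (namespace_type_py ty namespace_)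

-- ===== LEMMAS AND PROOFS =====

-- the stripped body never ends in '*'
theorem pvStrip_no_star (ty : List Char) :
    PySem.Chars.endswith (pvStripStars ty) "*".toList = false := by
  unfold pvStripStars
  rw [← Bool.not_eq_true, PySem.Chars.endswith_iff]
  intro hsuf
  cases hcase : List.dropWhile (fun c => c == '*') ty.reverse with
  | nil => rw [hcase] at hsuf; simp at hsuf
  | cons a l =>
    rw [hcase] at hsuf
    have hpre : "*".toList <+: a :: l := by simpa using hsuf.reverse
    have ha : a = '*' := by
      obtain ⟨t, ht⟩ := hpre
      simpa using (congrArg (fun x => List.head? x) ht).symm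
    have hfalse := List.head_dropWhile_not (p := fun c => c == '*') (l := ty.reverse)
      (by rw [hcase]; simp)
    simp only [hcase, List.head_cons, ha] at hfalse
    simp at hfalse

-- ty is the stripped body followed by the stripped stars
theorem pvStrip_decomp (ty : List Char) :
    ty = pvStripStars ty ++ List.replicate (ty.length - (pvStripStars ty).length) '*' := by
  unfold pvStripStars
  have hsplit := List.takeWhile_append_dropWhile (p := fun c => c == '*') (l := ty.reverse)
  have htake : List.takeWhile (fun c => c == '*') ty.reverse =
      List.replicate (List.takeWhile (fun c => c == '*') ty.reverse).length '*' :=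
    List.eq_replicate_of_mem (fun b hb => by simpa using List.mem_takeWhile_imp hb)
  have hlen : (List.takeWhile (fun c => c == '*') ty.reverse).length +
      (List.dropWhile (fun c => c == '*') ty.reverse).length = ty.length := by
    rw [← List.length_append, hsplit, List.length_reverse]
  conv_lhs => rw [← List.reverse_reverse ty, ← hsplit]
  rw [List.reverse_append]
  congr 1
  rw [htake]
  simp
  omega

-- '<' absent from a list stays absent from any drop of it
theorem pvIsInDrop (sub l : List Char) (k : Nat)
    (h : PySem.Chars.isIn sub l = false) : PySem.Chars.isIn sub (l.drop k) = false := by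
  rw [PySem.Chars.isIn_eq_false_iff] at h ⊢
  exact fun hinf => h (hinf.trans (List.drop_suffix k l).isInfix)

-- a list not ending in '*' keeps that property under drop
theorem pvEndsDrop (l : List Char) (k : Nat)
    (h : PySem.Chars.endswith l "*".toList = false) :
    PySem.Chars.endswith (l.drop k) "*".toList = false := by
  rw [← Bool.not_eq_true, PySem.Chars.endswith_iff] at h ⊢
  exact fun hsuf => h (hsuf.trans (List.drop_suffix k l))

-- peeling stars off: A on body ++ '*'*k is A on body followed by the stars
theorem nsA_stars (k : Nat) (body ns : List Char)
    (hst : PySem.Chars.endswith body "*".toList = false) :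
    nsA (body ++ List.replicate k '*') ns = nsA body ns ++ List.replicate k '*' := by
  induction k with
  | zero => simp
  | succ k ih =>
    have hrep : List.replicate (k + 1) '*' = List.replicate k '*' ++ ['*'] :=
      List.replicate_succ' ..
    have hform : body ++ List.replicate (k + 1) '*' =
        (body ++ List.replicate k '*') ++ ['*'] := by rw [hrep, List.append_assoc]
    have hne : body ++ List.replicate (k + 1) '*' ≠ [] := by simp
    have hend : PySem.Chars.endswith (body ++ List.replicate (k + 1) '*') "*".toList = true := by
      rw [PySem.Chars.endswith_iff, hform]
      exact List.suffix_append _ _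
    rw [nsA.eq_def]
    simp only [hne, hend, if_pos, reduceDIte]
    rw [PySem.List.slice_to_neg_one, hform, List.dropLast_concat, ih, hrep,
      List.append_assoc]
    simp

-- the peel loop is the identity on an empty body
theorem pvPeel_nil (mods : List Char) : pvPeelMods mods [] = (mods, []) := by
  rw [pvPeelMods.eq_def]
  simp [PySem.Chars.startswith]

-- A's modifier recursion equals B's peel loop followed by B's final assembly
theorem pvPeel_spec (n : Nat) (body mods ns : List Char) (hn : body.length ≤ n)
    (hlt : PySem.Chars.isIn "<".toList body = false)
    (hst : PySem.Chars.endswith body "*".toList = false) :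
    mods ++ nsA body ns =
      (match pvPeelMods mods body with
       | (m, core) =>
          if core = [] ∨ PySem.Chars.isIn "::".toList core || pvBuiltins.contains core then
            m ++ core
          else m ++ ns ++ "::".toList ++ core) := by
  induction n generalizing body mods with
  | zero =>
    have h0 : body = [] := List.eq_nil_of_length_eq_zero (by omega)
    subst h0
    rw [pvPeel_nil, nsA.eq_def]
    simp
  | succ n ih =>
    by_cases h0 : body = []
    · subst h0
      rw [pvPeel_nil, nsA.eq_def]
      simp
    · rw [pvPeelMods.eq_def, nsA.eq_def]
      rw [dif_neg h0, if_neg (by rw [hst]; simp), dif_neg (by rw [hlt]; simp)]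
      by_cases h1 : PySem.Chars.startswith body "const ".toList
      · have hlen : 6 ≤ body.length := by
          simpa using ((PySem.Chars.startswith_iff _ _).mp h1).length_le
        rw [dif_pos h1, if_pos h1]
        rw [PySem.List.slice_from body (by norm_num), show ((6 : Int)).toNat = 6 from by decide]
        rw [← List.append_assoc]
        exact ih (body.drop 6) (mods ++ "const ".toList) (by simp; omega)
          (pvIsInDrop _ _ _ hlt) (pvEndsDrop _ _ hst)
      · rw [dif_neg h1, if_neg h1]
        by_cases h2 : PySem.Chars.startswith body "signed ".toList
        · have hlen : 7 ≤ body.length := by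
            simpa using ((PySem.Chars.startswith_iff _ _).mp h2).length_le
          rw [dif_pos h2, if_pos h2]
          rw [PySem.List.slice_from body (by norm_num), show ((7 : Int)).toNat = 7 from by decide]
          rw [← List.append_assoc]
          exact ih (body.drop 7) (mods ++ "signed ".toList) (by simp; omega)
            (pvIsInDrop _ _ _ hlt) (pvEndsDrop _ _ hst)
        · rw [dif_neg h2, if_neg h2]
          by_cases h3 : PySem.Chars.startswith body "unsigned ".toList
          · have hlen : 9 ≤ body.length := by
              simpa using ((PySem.Chars.startswith_iff _ _).mp h3).length_le
            rw [dif_pos h3, if_pos h3]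
            rw [PySem.List.slice_from body (by norm_num),
              show ((9 : Int)).toNat = 9 from by decide]
            rw [← List.append_assoc]
            exact ih (body.drop 9) (mods ++ "unsigned ".toList) (by simp; omega)
              (pvIsInDrop _ _ _ hlt) (pvEndsDrop _ _ hst)
          · rw [dif_neg h3, if_neg h3]
            simp only [h0, false_or]
            split_ifs with hq
            · rfl
            · simp [List.append_assoc]

theorem nsA_eq_nsB (n : Nat) (ty ns : List Char) (hn : ty.length ≤ n) :
    nsA ty ns = nsB ty ns := by
  induction n generalizing ty with
  | zero =>
    have h0 : ty = [] := List.eq_nil_of_length_eq_zero (by omega)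
    subst h0
    rw [nsA.eq_def, nsB.eq_def]
    have hstrip : pvStripStars ([] : List Char) = [] := by decide
    rw [hstrip, pvPeel_nil]
    simp
    intro hco
    exact absurd hco (by decide)
  | succ n ih =>
    have hb_no := pvStrip_no_star ty
    have hdec := pvStrip_decomp ty
    have hlen := pvStripLe ty
    rw [nsB.eq_def]
    conv_lhs => rw [hdec]
    rw [nsA_stars _ _ ns hb_no]
    by_cases h : PySem.Chars.isIn "<".toList (pvStripStars ty)
    · have hne := pvIsInNe _ h
      rw [dif_pos h]
      congr 1
      rw [nsA.eq_def]
      rw [dif_neg hne, if_neg (by rw [hb_no]; simp), dif_pos h]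
      by_cases harr : ((PySem.Chars.split? (pvStripStars ty) "<".toList).getD []).headD [] =
          "array".toList
      · rw [if_pos harr, if_pos harr]
        have hinner := pvInnerLt (pvStripStars ty)
          (PySem.Chars.find (pvStripStars ty) "<".toList + 1)
          (PySem.Chars.rfind (pvStripStars ty) ">".toList) hne
          (by have := pvFindLtNonneg _ h; omega)
        rw [ih _ (by omega)]
      · rw [if_neg harr, if_neg harr]
    · rw [dif_neg h]
      have hp := pvPeel_spec (pvStripStars ty).length (pvStripStars ty) [] ns (le_refl _)
        (by simpa using h) hb_no
      simp only [List.nil_append] at hp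
      rw [hp]

-- ===== VERDICT (by name: the statement is the Claim_ definition above) =====
theorem namespace_type_py_spec : Claim_equal_namespace_type_py := by
  intro ty namespace_ _
  unfold Spec_namespace_type_py namespace_type_py namespace_type_py_alt
  rw [nsA_eq_nsB ty.toList.length ty.toList namespace_.toList (le_refl _)]
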